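-- pv_equiv track=rewrite | github.com/aalbert-dev/minkowski_solver | set_dilation/viz/poly_viz_3d.py | get_colors_from_angles
-- ===== SOURCE A (Python) =====
-- def get_colors_from_angles(z_coords):
--     num_points = len(z_coords)
--     unique_z = []
--
--     for z in z_coords:
--         if z not in unique_z:
--             unique_z.append(z)
--     z_length = num_points // len(unique_z)
--     color_seq = []
--     for i in range(0, num_points):
--         col_index = int(i / z_length)
--         color_seq.append(col_index)
--     return color_seq
-- ===== SOURCE B (Python) =====
-- def get_colors_from_angles(z_coords):
--     num_points = len(z_coords)
--     # distinct-z count by sort + single adjacent scan (no quadratic membership tests)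
--     s = sorted(z_coords)
--     distinct = 0
--     prev = None
--     for z in s:
--         if prev is None or z != prev:
--             distinct += 1
--         prev = z
--     z_length = num_points // distinct
--     # build the colour sequence block-wise instead of per-index division
--     color_seq = []
--     color = 0
--     while len(color_seq) < num_points:
--         color_seq.extend([color] * z_length)
--         color += 1
--     return color_seq[:num_points]
-- ===== Notes on version B (the rewrite author's own statement) =====
-- stated objective: faster
-- what changed: Replaces the quadratic list-membership distinct count with a sort-plus-adjacent-scan count and builds the colour sequence block-wise ([color]*z_length per colour, truncated to n) instead of computing int(i/z_length) per index.
import Mathlib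
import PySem

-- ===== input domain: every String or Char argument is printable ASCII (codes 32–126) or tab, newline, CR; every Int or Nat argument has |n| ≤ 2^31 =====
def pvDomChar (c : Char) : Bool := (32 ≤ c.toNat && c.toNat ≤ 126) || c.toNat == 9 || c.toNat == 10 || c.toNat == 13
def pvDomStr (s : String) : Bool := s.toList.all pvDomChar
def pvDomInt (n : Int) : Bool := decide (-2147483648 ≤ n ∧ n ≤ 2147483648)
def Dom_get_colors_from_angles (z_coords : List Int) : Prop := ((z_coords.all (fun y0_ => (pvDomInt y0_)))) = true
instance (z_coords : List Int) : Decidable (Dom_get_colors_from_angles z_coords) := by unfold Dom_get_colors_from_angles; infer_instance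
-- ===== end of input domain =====

-- B replaces A's quadratic membership-based distinct count by a sort+adjacent-scan count and builds
-- the colour list block-wise; objective: faster (asymptotic).

-- ===== PORT A =====
-- int(i / z_length) is ported as floor division: exact for 0 ≤ i and 0 < z_length at list-length scale.
def get_colors_from_angles (z_coords : List Int) : List Int :=
  let num_points : Int := z_coords.length
  let unique_z : List Int :=
    z_coords.foldl (fun acc z => if z ∈ acc then acc else acc ++ [z]) []
  let z_length : Int := PySem.Int.floordiv num_points unique_z.length
  (PySem.List.pyRange 0 num_points 1).map (fun i => PySem.Int.floordiv i z_length)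

-- ===== PORT B =====
-- the `for z in s` distinct-count loop of Source B
def altCount (s : List Int) : Nat :=
  (s.foldl (fun (st : Nat × Option Int) z =>
      (if st.2 = none ∨ st.2 ≠ some z then st.1 + 1 else st.1, some z)) (0, none)).1

-- the `while len(color_seq) < num_points` loop of Source B (the 0 < zl conjunct only makes the
-- recursion total; Python diverges there, which is unreachable inside Pre_)
def altLoop (n zl : Nat) (c : Int) (out : List Int) : List Int :=
  if out.length < n ∧ 0 < zl then
    altLoop n zl (c + 1) (out ++ List.replicate zl c)
  else out
termination_by n - out.length
decreasing_by simp_all; omega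

def get_colors_from_angles_alt (z_coords : List Int) : List Int :=
  let num_points := z_coords.length
  let s := PySem.List.sorted z_coords id false
  let distinct := altCount s
  -- num_points // distinct : Nat division is exact here (both operands nonnegative)
  let z_length := num_points / distinct
  (altLoop num_points z_length 0 []).take num_points

-- ===== PRECONDITION & SPEC =====
-- Pre_ excludes only the empty list, on which both A and B raise ZeroDivisionError.
def Pre_get_colors_from_angles (z_coords : List Int) : Prop := z_coords ≠ []
instance (z_coords : List Int) : Decidable (Pre_get_colors_from_angles z_coords) := by
  unfold Pre_get_colors_from_angles; infer_instance
def pvWitness_get_colors_from_angles : List Int := [0]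

def Spec_get_colors_from_angles (z_coords : List Int) (out : List Int) : Prop := out = get_colors_from_angles_alt z_coords
instance (z_coords : List Int) (out : List Int) : Decidable (Spec_get_colors_from_angles z_coords out) := by unfold Spec_get_colors_from_angles; infer_instance

-- ===== CLAIM (what is proved, stated in full; the proofs are below) =====
def Claim_equal_get_colors_from_angles : Prop := ∀ (z_coords : List Int), Dom_get_colors_from_angles z_coords → Pre_get_colors_from_angles z_coords → Spec_get_colors_from_angles z_coords (get_colors_from_angles z_coords)

-- ===== LEMMAS AND PROOFS =====

-- A's unique_z fold: nodup accumulator with the same member set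
lemma uniqueFold_spec (zs : List Int) :
    ∀ acc : List Int, acc.Nodup →
      (zs.foldl (fun acc z => if z ∈ acc then acc else acc ++ [z]) acc).Nodup ∧
      (∀ x, x ∈ zs.foldl (fun acc z => if z ∈ acc then acc else acc ++ [z]) acc ↔ x ∈ acc ∨ x ∈ zs) := by
  induction zs with
  | nil => intro acc h; simpa using h
  | cons z t ih =>
    intro acc h
    simp only [List.foldl_cons]
    by_cases hz : z ∈ acc
    · rcases ih acc h with ⟨h1, h2⟩
      simp only [if_pos hz]
      refine ⟨h1, fun x => ?_⟩
      rw [h2]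
      constructor
      · rintro (hx | hx)
        · exact Or.inl hx
        · exact Or.inr (List.mem_cons_of_mem _ hx)
      · rintro (hx | hx)
        · exact Or.inl hx
        · rcases List.mem_cons.mp hx with rfl | hx
          · exact Or.inl hz
          · exact Or.inr hx
    · have hnd : (acc ++ [z]).Nodup := by
        rw [List.nodup_append]
        refine ⟨h, by simp, ?_⟩
        intro a ha b hb
        rw [List.mem_singleton] at hb
        subst hb
        exact fun hEq => hz (hEq ▸ ha)
      rcases ih (acc ++ [z]) hnd with ⟨h1, h2⟩
      simp only [if_neg hz]
      refine ⟨h1, fun x => ?_⟩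
      rw [h2]
      simp [or_assoc, or_comm, or_left_comm]
  
-- pure recursion equal to Source B's distinct-count fold
def cdAux : Option Int → List Int → Nat
  | _, [] => 0
  | p, z :: t => (if p = none ∨ p ≠ some z then 1 else 0) + cdAux (some z) t

lemma altCount_foldl (s : List Int) :
    ∀ (k : Nat) (p : Option Int),
      (s.foldl (fun (st : Nat × Option Int) z =>
        (if st.2 = none ∨ st.2 ≠ some z then st.1 + 1 else st.1, some z)) (k, p)).1
      = k + cdAux p s := by
  induction s with
  | nil => intro k p; simp [cdAux]
  | cons z t ih =>
    intro k p
    simp only [List.foldl_cons, cdAux]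
    by_cases h : p = none ∨ p ≠ some z
    · rw [if_pos h, if_pos h, ih]; omega
    · rw [if_neg h, if_neg h, ih]; omega

-- adjacent scan over a sorted tail counts the remaining distinct values
lemma cdAux_some_sorted (s : List Int) :
    ∀ a : Int, (a :: s).Pairwise (· ≤ ·) →
      cdAux (some a) s = (insert a s.toFinset).card - 1 := by
  induction s with
  | nil => intro a _; simp [cdAux]
  | cons b t ih =>
    intro a hs
    have hab : a ≤ b := (List.pairwise_cons.mp hs).1 b (by simp)
    have hbt : (b :: t).Pairwise (· ≤ ·) := (List.pairwise_cons.mp hs).2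
    have iht := ih b hbt
    simp only [cdAux]
    by_cases hEq : a = b
    · subst hEq
      rw [if_neg (by simp)]
      simp only [List.toFinset_cons, Finset.insert_idem, Nat.zero_add]
      exact iht
    · have hcond : ((some a : Option Int) = none ∨ (some a : Option Int) ≠ some b) := by
        right; simp [hEq]
      rw [if_pos hcond]
      have ha_not : a ∉ insert b t.toFinset := by
        intro hmem
        rcases Finset.mem_insert.mp hmem with rfl | hmem
        · exact hEq rfl
        · have := (List.pairwise_cons.mp hbt).1 a (List.mem_toFinset.mp hmem)
          have : a < b := lt_of_le_of_ne hab hEq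
          omega
      simp only [List.toFinset_cons]
      rw [Finset.card_insert_of_notMem ha_not, iht]
      have : 0 < (insert b t.toFinset).card := Finset.card_pos.mpr ⟨b, by simp⟩
      omega

lemma cdAux_none_sorted (s : List Int) (hs : s.Pairwise (· ≤ ·)) :
    cdAux none s = s.toFinset.card := by
  cases s with
  | nil => simp [cdAux]
  | cons a t =>
    simp only [cdAux]
    rw [if_pos (by simp), cdAux_some_sorted t a hs]
    have : 0 < (insert a t.toFinset).card := Finset.card_pos.mpr ⟨a, by simp⟩
    simp only [List.toFinset_cons]
    omega

lemma altCount_eq_card (z : List Int) :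
    altCount (PySem.List.sorted z id false) = z.toFinset.card := by
  unfold altCount
  rw [altCount_foldl]
  have hperm : (PySem.List.sorted z id false).Perm z := PySem.List.sorted_perm ..
  have hpw : (PySem.List.sorted z id false).Pairwise (fun a b => id a ≤ id b) :=
    PySem.List.sorted_pairwise ..
  simp only [id] at hpw
  rw [cdAux_none_sorted _ hpw, List.toFinset_eq_of_perm _ _ hperm]
  simp

-- block decomposition of the closed-form colour list
lemma range_block (zl j : Nat) (hzl : 0 < zl) :
    (List.range ((j + 1) * zl)).map (fun i => ((i / zl : Nat) : Int))
      = (List.range (j * zl)).map (fun i => ((i / zl : Nat) : Int)) ++ List.replicate zl (j : Int) := by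
  have : (j + 1) * zl = j * zl + zl := by ring
  rw [this, List.range_add, List.map_append]
  congr 1
  rw [List.map_map]
  apply List.eq_replicate_iff.mpr
  constructor
  · simp
  · intro b hb
    simp only [List.mem_map, Function.comp, List.mem_range] at hb
    rcases hb with ⟨x, hx, rfl⟩
    have hdiv : (j * zl + x) / zl = j := by
      rw [Nat.add_comm, Nat.add_mul_div_right _ _ hzl, Nat.div_eq_of_lt hx]
      omega
    simp [hdiv]

lemma altLoop_take (n zl : Nat) (hzl : 0 < zl) :
    ∀ j : Nat,
      (altLoop n zl (j : Int) ((List.range (j * zl)).map (fun i => ((i / zl : Nat) : Int)))).take n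
        = (List.range n).map (fun i => ((i / zl : Nat) : Int)) := by
  intro j
  by_cases h : j * zl < n
  · rw [altLoop]
    have hlen : ((List.range (j * zl)).map (fun i => ((i / zl : Nat) : Int))).length = j * zl := by
      simp
    rw [if_pos (by rw [hlen]; exact ⟨h, hzl⟩)]
    have hblk := (range_block zl j hzl).symm
    have hc : ((j : Int) + 1) = ((j + 1 : Nat) : Int) := by push_cast; ring
    rw [hblk, hc]
    exact altLoop_take n zl hzl (j + 1)
  · rw [altLoop]
    have hlen : ((List.range (j * zl)).map (fun i => ((i / zl : Nat) : Int))).length = j * zl := by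
      simp
    rw [if_neg (by rw [hlen]; intro hc; exact h hc.1)]
    have hmn : min n (j * zl) = n := by omega
    rw [← List.map_take, List.take_range, hmn]
termination_by j => n - j * zl
decreasing_by
  have : (j + 1) * zl = j * zl + zl := by ring
  omega

-- ===== VERDICT (by name: the statement is the Claim_ definition above) =====
theorem get_colors_from_angles_spec : Claim_equal_get_colors_from_angles := by
  intro z _ hne
  unfold Spec_get_colors_from_angles get_colors_from_angles get_colors_from_angles_alt
  -- common quantities
  have hufold := uniqueFold_spec z [] (by simp)
  set u := z.foldl (fun acc z => if z ∈ acc then acc else acc ++ [z]) [] with hu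
  have hcardu : u.length = z.toFinset.card := by
    have hset : u.toFinset = z.toFinset := by
      apply Finset.ext
      intro x
      simp only [List.mem_toFinset]
      rw [(hufold.2 x)]
      simp
    rw [← hset, List.toFinset_card_of_nodup hufold.1]
  have hcount := altCount_eq_card z
  set C := z.toFinset.card with hC
  have hCpos : 0 < C := by
    rcases List.exists_mem_of_ne_nil z hne with ⟨a, ha⟩
    exact Finset.card_pos.mpr ⟨a, List.mem_toFinset.mpr ha⟩
  have hClen : C ≤ z.length := List.toFinset_card_le z
  set zl := z.length / C with hzl
  have hzlpos : 0 < zl := Nat.div_pos hClen hCpos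
  -- A side reduces to the closed form
  have hA : (PySem.List.pyRange 0 (z.length : Int) 1).map
        (fun i => PySem.Int.floordiv i (PySem.Int.floordiv (z.length : Int) (u.length : Int)))
      = (List.range z.length).map (fun i => ((i / zl : Nat) : Int)) := by
    rw [hcardu]
    have hfd : PySem.Int.floordiv (z.length : Int) (C : Int) = ((zl : Nat) : Int) := by
      rw [hzl]; exact PySem.Int.floordiv_natCast ..
    rw [hfd]
    rw [PySem.List.pyRange_one, List.map_map]
    simp only [Function.comp, Int.toNat_natCast, zero_add]
    apply List.map_congr_left
    intro k hk
    exact PySem.Int.floordiv_natCast k zl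
  dsimp only
  rw [hA, hcount, ← hzl]
  have h0 : ([] : List Int) = (List.range (0 * zl)).map (fun i => ((i / zl : Nat) : Int)) := by simp
  rw [h0]
  have := altLoop_take z.length zl hzlpos 0
  simpa using this.symm
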